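-- pv_equiv track=rewrite | github.com/cokotracy/netaddiction_addons | netaddiction_notification/models/base_class.py | _html2list
-- ===== SOURCE A (Python) =====
-- def _html2list(x, b=0):
--     import string
--     mode = 'char'
--     cur = ''
--     out = []
--     for c in x:
--         if mode == 'tag':
--             if c == '>':
--                 if b: cur += ']'
--                 else: cur += c
--                 out.append(cur); cur = ''; mode = 'char'
--             else: cur += c
--         elif mode == 'char':
--             if c == '<':
--                 out.append(cur)
--                 if b: cur = '['
--                 else: cur = c
--                 mode = 'tag'
--             elif c in string.whitespace: out.append(cur+c); cur = ''
--             else: cur += c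
--     out.append(cur)
--     return filter(lambda x: x is not '', out)
-- ===== SOURCE B (Python) =====
-- def _bracket(t):
--     if t.startswith('<'):
--         t = '[' + t[1:]
--         if t.endswith('>'):
--             t = t[:-1] + ']'
--     return t
--
-- def _html2list(x, b=0):
--     import re
--     tokens = re.findall(
--         r'<[^>]*>?|[^< \t\n\r\x0b\x0c]*[ \t\n\r\x0b\x0c]|[^< \t\n\r\x0b\x0c]+', x)
--     if b:
--         tokens = [_bracket(t) for t in tokens]
--     return filter(lambda z: z != '', tokens)
-- ===== Notes on version B (the rewrite author's own statement) =====
-- stated objective: faster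
-- what changed: Replaced the per-character mode/state-machine loop with a regex tokenizer (one re.findall with an explicit-whitespace pattern matching whole tags and whole words at once) followed by a bracket-substitution pass for truthy b.
import Mathlib
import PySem

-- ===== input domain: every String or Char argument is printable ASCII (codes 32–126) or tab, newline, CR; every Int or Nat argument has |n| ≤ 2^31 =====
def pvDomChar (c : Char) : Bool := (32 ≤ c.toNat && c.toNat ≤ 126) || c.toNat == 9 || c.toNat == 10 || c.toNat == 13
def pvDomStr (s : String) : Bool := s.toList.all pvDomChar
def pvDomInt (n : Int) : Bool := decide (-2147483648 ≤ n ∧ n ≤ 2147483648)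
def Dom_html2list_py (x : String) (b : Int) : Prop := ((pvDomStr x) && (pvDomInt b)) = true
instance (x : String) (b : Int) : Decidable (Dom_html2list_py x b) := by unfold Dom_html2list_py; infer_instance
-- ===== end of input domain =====

-- B replaces A's per-character mode/state machine by a whole-token regex-style tokenizer
-- plus a bracket-substitution pass (same O(n); measurably faster in Python, where the regex engine runs in C).
-- Both A and B return a lazy `filter` object in Python; equivalence is about the yielded values.

-- ===== PORT A =====
-- string.whitespace
def pyWsA : List Char := [' ', '\t', '\n', '\r', '\x0B', '\x0C']

def stepA (b : Int) (st : Bool × List Char × List String) (c : Char) : Bool × List Char × List String :=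
  if st.1 then
    if c = '>' then (false, [], st.2.2 ++ [String.mk (st.2.1 ++ [if b ≠ 0 then ']' else c])])
    else (true, st.2.1 ++ [c], st.2.2)
  else
    if c = '<' then (true, if b ≠ 0 then ['['] else [c], st.2.2 ++ [String.mk st.2.1])
    else if c ∈ pyWsA then (false, [], st.2.2 ++ [String.mk (st.2.1 ++ [c])])
    else (false, st.2.1 ++ [c], st.2.2)

def html2list_py (x : String) (b : Int) : List String :=
  let st := x.toList.foldl (stepA b) (false, [], [])
  (st.2.2 ++ [String.mk st.2.1]).filter (fun s => s ≠ "")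

-- ===== PORT B =====
def isWsB (c : Char) : Bool := c = ' ' || c = '\t' || c = '\n' || c = '\r' || c = '\x0B' || c = '\x0C'

def wordCharB (c : Char) : Bool := !(c = '<') && !isWsB c

-- hand port of re.findall with the fixed pattern r'<[^>]*>?|[^<ws]*ws|[^<ws]+'
-- (leftmost match, alternatives tried left to right, greedy star) — exact for this pattern
def tokenizeB : List Char → List (List Char)
  | [] => []
  | c :: rest =>
    if c = '<' then
      match hg : rest.dropWhile (fun d => !(d = '>')) with
      | _ :: tl => ('<' :: rest.takeWhile (fun d => !(d = '>')) ++ ['>']) :: tokenizeB tl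
      | [] => ['<' :: rest.takeWhile (fun d => !(d = '>'))]
    else
      match h : (c :: rest).dropWhile wordCharB with
      | d :: tl =>
        if isWsB d then ((c :: rest).takeWhile wordCharB ++ [d]) :: tokenizeB tl
        else (c :: rest).takeWhile wordCharB :: tokenizeB (d :: tl)
      | [] => [(c :: rest).takeWhile wordCharB]
  termination_by l => l.length
  decreasing_by
  · have h1 := List.length_dropWhile_le (fun d => !(d = '>')) rest
    have h2 := congrArg List.length hg
    simp at h2 ⊢; omega
  · have h1 := List.length_dropWhile_le wordCharB (c :: rest)
    have h2 := congrArg List.length h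
    simp at h1 h2 ⊢; omega
  · -- d is not whitespace and stops dropWhile, so d = '<' ≠ c, hence c was consumed
    have hw : wordCharB c = true := by
      by_contra hc
      have hcc : wordCharB c = false := by simpa using hc
      have hdw : (c :: rest).dropWhile wordCharB = c :: rest := by
        simp [List.dropWhile_cons, hcc]
      rw [hdw] at h
      obtain ⟨hd, htl⟩ := List.cons.inj h
      rename_i hne hws
      apply hws
      rw [← hd]
      simp only [wordCharB, Bool.and_eq_false_iff, Bool.not_eq_false', decide_eq_true_eq,
        Bool.not_eq_false] at hcc
      rcases hcc with h1 | h1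
      · exact absurd h1 hne
      · exact h1
    have h2 : (c :: rest).dropWhile wordCharB = rest.dropWhile wordCharB := by
      simp [List.dropWhile_cons, hw]
    have h3 := List.length_dropWhile_le wordCharB rest
    rw [h2] at h
    have h4 := congrArg List.length h
    simp at h3 h4 ⊢; omega

def bracketB (t : List Char) : List Char :=
  if t.head? = some '<' then
    let t2 := '[' :: t.drop 1
    if t2.getLast? = some '>' then t2.dropLast ++ [']'] else t2
  else t

def html2list_py_alt (x : String) (b : Int) : List String :=
  let toks := tokenizeB x.toList
  let toks := if b ≠ 0 then toks.map bracketB else toks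
  (toks.map String.mk).filter (fun s => s ≠ "")

-- ===== PRECONDITION & SPEC =====
def Spec_html2list_py (x : String) (b : Int) (out : List String) : Prop := out = html2list_py_alt x b
instance (x : String) (b : Int) (out : List String) : Decidable (Spec_html2list_py x b out) := by unfold Spec_html2list_py; infer_instance

-- ===== CLAIM (what is proved, stated in full; the proofs are below) =====
def Claim_equal_html2list_py : Prop := ∀ (x : String) (b : Int), Dom_html2list_py x b → Spec_html2list_py x b (html2list_py x b)

-- ===== LEMMAS AND PROOFS =====

/-- substitution applied per token on the B side -/
def subT (b : Int) (t : List Char) : List Char := if b ≠ 0 then bracketB t else t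

/-- B's pipeline on a raw token list -/
def outTok (b : Int) (ts : List (List Char)) : List String :=
  ((ts.map (subT b)).map String.mk).filter (fun s => s ≠ "")

/-- merge A's pending word accumulator into the front of a token list -/
def glueT (cur : List Char) (ts : List (List Char)) : List (List Char) :=
  match ts with
  | [] => [cur]
  | t :: rest => if t.head? = some '<' then cur :: t :: rest else (cur ++ t) :: rest

theorem bracketB_word (cur : List Char) (h : cur.all wordCharB = true) : bracketB cur = cur := by
  cases cur with
  | nil => simp [bracketB]
  | cons c tl =>
    simp only [List.all_cons, Bool.and_eq_true] at h
    have : ¬ (c = '<') := by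
      intro hc; subst hc; simp [wordCharB] at h
    simp [bracketB, this]

theorem subT_word (b : Int) (cur : List Char) (h : cur.all wordCharB = true) : subT b cur = cur := by
  unfold subT; split
  · exact bracketB_word cur h
  · rfl

theorem subT_nil (b : Int) : subT b [] = [] := by
  unfold subT; split <;> simp [bracketB]

theorem outTok_cons (b : Int) (t : List Char) (ts : List (List Char)) :
    outTok b (t :: ts) = (if String.mk (subT b t) ≠ "" then [String.mk (subT b t)] else []) ++ outTok b ts := by
  simp only [outTok, List.map_cons, List.filter_cons]
  split <;> simp_all

theorem mk_nil : String.mk [] = "" := rfl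

theorem outTok_nil (b : Int) : outTok b [] = [] := rfl

theorem filter_single (x : String) :
    List.filter (fun s => decide (s ≠ "")) [x] = if x ≠ "" then [x] else [] := by
  by_cases h : x = "" <;> simp [h]

theorem glueT_cons (cur t : List Char) (rest : List (List Char)) :
    glueT cur (t :: rest) = if t.head? = some '<' then cur :: t :: rest else (cur ++ t) :: rest := rfl

theorem glueT_nil (b : Int) (ts : List (List Char)) :
    outTok b (glueT [] ts) = outTok b ts := by
  cases ts with
  | nil => simp [glueT, outTok, subT_nil, mk_nil]
  | cons t rest =>
    rw [glueT_cons]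
    split
    · rw [outTok_cons, subT_nil, mk_nil]; simp
    · simp

theorem tagRun (b : Int) (l : List Char) (cur : List Char) (out : List String)
    (h : l.all (fun c => !(c = '>')) = true) :
    l.foldl (stepA b) (true, cur, out) = (true, cur ++ l, out) := by
  induction l generalizing cur with
  | nil => simp
  | cons c tl ih =>
    simp only [List.all_cons, Bool.and_eq_true] at h
    have hc : ¬ (c = '>') := by simpa using h.1
    simp only [List.foldl_cons]
    have hs : stepA b (true, cur, out) c = (true, cur ++ [c], out) := by
      simp [stepA, hc]
    rw [hs, ih _ h.2]
    simp

theorem getLast?_cons_all (p : Char → Bool) (a : Char) (body : List Char)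
    (ha : p a = true) (h : body.all p = true) :
    ∃ z, (a :: body).getLast? = some z ∧ p z = true := by
  induction body generalizing a with
  | nil => exact ⟨a, by simp, ha⟩
  | cons c tl ih =>
    simp only [List.all_cons, Bool.and_eq_true] at h
    obtain ⟨z, hz, hp⟩ := ih c h.1 h.2
    exact ⟨z, by rw [List.getLast?_cons_cons]; exact hz, hp⟩

theorem subT_tag_open (b : Int) (body : List Char) (h : body.all (fun d => !(d = '>')) = true) :
    subT b ('<' :: body) = (if b ≠ 0 then ['['] else ['<']) ++ body := by
  unfold subT
  split
  · unfold bracketB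
    obtain ⟨z, hz, hp⟩ := getLast?_cons_all (fun d => !(d = '>')) '[' body (by decide) h
    simp only [List.head?_cons, Option.some.injEq, if_pos rfl, List.drop_one, List.tail_cons]
    rw [hz]
    have : ¬ (z = '>') := by simpa using hp
    simp [this]
  · simp

theorem subT_tag_closed (b : Int) (body : List Char) :
    subT b ('<' :: body ++ ['>']) = (if b ≠ 0 then ['['] else ['<']) ++ body ++ [if b ≠ 0 then ']' else '>'] := by
  unfold subT
  split
  · unfold bracketB
    simp only [List.cons_append, List.head?_cons, List.drop_one, List.tail_cons, if_pos rfl]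
    rw [← List.cons_append, List.getLast?_concat, if_pos rfl, List.dropLast_concat]
    simp
  · simp

theorem ws_mem_iff (c : Char) : (c ∈ pyWsA) ↔ isWsB c = true := by
  simp [pyWsA, isWsB]
  tauto

theorem tokenizeB_lt_head (rest : List Char) :
    ∃ t ts, tokenizeB ('<' :: rest) = t :: ts ∧ t.head? = some '<' := by
  rw [tokenizeB]
  simp only [if_pos rfl]
  cases hd : rest.dropWhile (fun d => !(d = '>')) with
  | nil => exact ⟨_, _, rfl, by simp⟩
  | cons g tl => exact ⟨_, _, rfl, by simp⟩

theorem subT_no_lt (b : Int) (t : List Char) (h : ¬ t.head? = some '<') : subT b t = t := by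
  unfold subT bracketB
  split <;> simp [h]

theorem mk_eq_empty_iff (l : List Char) : String.mk l = "" ↔ l = [] := by
  constructor
  · intro h
    have h2 := congrArg String.toList h
    rw [show (String.mk l).toList = l from String.toList_ofList] at h2
    simp at h2
    exact h2
  · intro h; subst h; rfl

theorem takeWhile_head_no_lt (l : List Char) : ¬ (l.takeWhile wordCharB).head? = some '<' := by
  intro h
  cases hl : l.takeWhile wordCharB with
  | nil => rw [hl] at h; cases h
  | cons a t =>
    rw [hl] at h
    simp only [List.head?_cons, Option.some.injEq] at h
    subst h
    have : wordCharB '<' = true :=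
      List.mem_takeWhile_imp (hl ▸ List.mem_cons_self)
    simp [wordCharB] at this

theorem tokenizeB_nil : tokenizeB [] = [] := by rw [tokenizeB]

theorem tokenizeB_word_eq (c : Char) (rest : List Char) (hne : ¬ c = '<') :
    tokenizeB (c :: rest) =
      match (c :: rest).dropWhile wordCharB with
      | d :: tl =>
        if isWsB d then ((c :: rest).takeWhile wordCharB ++ [d]) :: tokenizeB tl
        else (c :: rest).takeWhile wordCharB :: tokenizeB (d :: tl)
      | [] => [(c :: rest).takeWhile wordCharB] := by
  rw [tokenizeB]
  simp only [if_neg hne]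
  cases h : (c :: rest).dropWhile wordCharB <;> rfl

theorem tokenizeB_lt_eq (rest : List Char) :
    tokenizeB ('<' :: rest) =
      match rest.dropWhile (fun d => !(d = '>')) with
      | _ :: tl => ('<' :: rest.takeWhile (fun d => !(d = '>')) ++ ['>']) :: tokenizeB tl
      | [] => ['<' :: rest.takeWhile (fun d => !(d = '>'))] := by
  rw [tokenizeB]
  simp only [if_pos rfl]
  cases h : rest.dropWhile (fun d => !(d = '>')) <;> rfl

theorem crux (c : Char) (rest : List Char) (cur : List Char) (hw : wordCharB c = true) :
    glueT cur (tokenizeB (c :: rest)) = glueT (cur ++ [c]) (tokenizeB rest) := by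
  have hne : ¬ (c = '<') := by
    intro h; subst h; simp [wordCharB] at hw
  have htake : (c :: rest).takeWhile wordCharB = c :: rest.takeWhile wordCharB := by
    simp [List.takeWhile_cons, hw]
  have hdrop : (c :: rest).dropWhile wordCharB = rest.dropWhile wordCharB := by
    simp [List.dropWhile_cons, hw]
  rw [tokenizeB_word_eq c rest hne, hdrop, htake]
  cases hr : rest with
  | nil =>
    simp [tokenizeB, List.dropWhile_nil, List.takeWhile_nil, glueT, hne]
  | cons e rest' =>
    by_cases he : e = '<'
    · subst he
      have hd : ('<' :: rest').dropWhile wordCharB = '<' :: rest' := by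
        simp [List.dropWhile_cons, wordCharB]
      have ht : ('<' :: rest').takeWhile wordCharB = [] := by
        simp [List.takeWhile_cons, wordCharB]
      obtain ⟨t, ts, hts, hth⟩ := tokenizeB_lt_head rest'
      rw [hd, ht, hts]
      simp only [show isWsB '<' = false from by decide, Bool.false_eq_true, if_false]
      rw [glueT_cons, glueT_cons, if_neg (by simp [hne]), if_pos hth, ← hts]
    · rw [tokenizeB_word_eq e rest' he]
      cases hdd : (e :: rest').dropWhile wordCharB with
      | nil =>
        rw [glueT_cons, glueT_cons,
          if_neg (by simp [hne]), if_neg (takeWhile_head_no_lt (e :: rest'))]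
        simp
      | cons d tl =>
        by_cases hws : isWsB d = true
        · simp only [hws, if_true]
          rw [glueT_cons, glueT_cons, if_neg (by simp [hne]), if_neg ?_]
          · simp
          · -- head of tw ++ [d] is a word char or the whitespace d, never '<'
            cases htw : (e :: rest').takeWhile wordCharB with
            | nil =>
              simp only [List.nil_append, List.head?_cons]
              intro h
              have : (d = '<') := by simpa using h
              subst this; simp [isWsB] at hws
            | cons a t =>
              simp only [List.cons_append, List.head?_cons]
              intro h
              have ha : a = '<' := by simpa using h
              subst ha
              have : wordCharB '<' = true :=
                List.mem_takeWhile_imp (htw ▸ List.mem_cons_self)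
              simp [wordCharB] at this
        · simp only [hws, Bool.false_eq_true, if_false]
          have htw : ∃ a t, (e :: rest').takeWhile wordCharB = a :: t := by
            cases htw : (e :: rest').takeWhile wordCharB with
            | cons a t => exact ⟨a, t, rfl⟩
            | nil =>
              exfalso
              have hew : wordCharB e = false := by
                by_contra hh
                rw [List.takeWhile_cons, if_pos (by simpa using hh)] at htw
                cases htw
              rw [List.dropWhile_cons, hew] at hdd
              simp only [Bool.false_eq_true, if_false] at hdd
              obtain ⟨hde, _⟩ := List.cons.inj hdd
              subst hde
              simp [wordCharB, he] at hew
              exact hws hew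
          obtain ⟨a, t, hat⟩ := htw
          rw [glueT_cons, glueT_cons, if_neg (by simp [hne]), if_neg ?_]
          · simp
          · rw [hat]
            simp only [List.head?_cons]
            intro h
            have ha : a = '<' := by simpa using h
            subst ha
            have : wordCharB '<' = true :=
              List.mem_takeWhile_imp (hat ▸ List.mem_cons_self)
            simp [wordCharB] at this

theorem dropWhile_head_false (p : Char → Bool) (l : List Char) (g : Char) (tl : List Char)
    (h : l.dropWhile p = g :: tl) : p g = false := by
  have := List.head?_dropWhile_not p l
  rw [h] at this
  simpa using this

theorem mainA (b : Int) : ∀ (n : Nat) (l : List Char), l.length ≤ n →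
    ∀ (cur : List Char) (out : List String), cur.all wordCharB = true →
    ((l.foldl (stepA b) (false, cur, out)).2.2 ++ [String.mk (l.foldl (stepA b) (false, cur, out)).2.1]).filter (fun s => s ≠ "")
      = out.filter (fun s => s ≠ "") ++ outTok b (glueT cur (tokenizeB l)) := by
  intro n
  induction n with
  | zero =>
    intro l hl cur out hcur
    have hnil : l = [] := List.length_eq_zero_iff.mp (Nat.le_zero.mp hl)
    subst hnil
    rw [tokenizeB_nil]
    simp [glueT, outTok, List.filter_append, subT_word b cur hcur]
  | succ n ih =>
    intro l hl cur out hcur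
    cases l with
    | nil =>
      rw [tokenizeB_nil]
      simp [glueT, outTok, List.filter_append, subT_word b cur hcur]
    | cons c rest =>
      have hrest : rest.length ≤ n := by simpa using hl
      simp only [List.foldl_cons]
      by_cases hc : c = '<'
      · subst hc
        have hstep : stepA b (false, cur, out) '<'
            = (true, if b ≠ 0 then ['['] else ['<'], out ++ [String.mk cur]) := by
          simp [stepA]
        rw [hstep, tokenizeB_lt_eq]
        cases hg : rest.dropWhile (fun d => !(d = '>')) with
        | nil =>
          have hrb : rest.takeWhile (fun d => !(d = '>')) = rest := by
            conv_rhs => rw [← List.takeWhile_append_dropWhile (p := fun d => !(d = '>')) (l := rest)]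
            rw [hg, List.append_nil]
          have hall : rest.all (fun d => !(d = '>')) = true := hrb ▸ List.all_takeWhile
          rw [tagRun b rest _ _ hall, hrb]
          rw [glueT_cons, if_pos (show ('<' :: rest).head? = some '<' from rfl),
            outTok_cons, outTok_cons, subT_word b cur hcur, subT_tag_open b rest hall]
          have hne : String.mk ((if b ≠ 0 then ['['] else ['<']) ++ rest) ≠ "" := by
            rw [Ne, mk_eq_empty_iff]; split <;> simp
          rw [List.filter_append, List.filter_append, filter_single, filter_single,
            if_pos hne, outTok_nil]
          simp
        | cons g tl =>
          have hgt : g = '>' := by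
            have := dropWhile_head_false _ rest g tl hg
            simpa using this
          subst hgt
          have htl : tl.length ≤ n := by
            have h1 := List.length_dropWhile_le (fun d => !(d = '>')) rest
            rw [hg] at h1
            simp only [List.length_cons] at h1
            omega
          have hfold : rest.foldl (stepA b) (true, if b ≠ 0 then ['['] else ['<'], out ++ [String.mk cur])
              = tl.foldl (stepA b) (false, [],
                  (out ++ [String.mk cur]) ++ [String.mk ((if b ≠ 0 then ['['] else ['<']) ++ rest.takeWhile (fun d => !(d = '>')) ++ [if b ≠ 0 then ']' else '>'])]) := by
            conv_lhs => rw [← List.takeWhile_append_dropWhile (p := fun d => !(d = '>')) (l := rest)]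
            rw [hg, List.foldl_append,
              tagRun b (rest.takeWhile (fun d => !(d = '>'))) _ _ List.all_takeWhile,
              List.foldl_cons]
            have : stepA b (true, (if b ≠ 0 then ['['] else ['<']) ++ rest.takeWhile (fun d => !(d = '>')), out ++ [String.mk cur]) '>'
                = (false, [], (out ++ [String.mk cur]) ++ [String.mk ((if b ≠ 0 then ['['] else ['<']) ++ rest.takeWhile (fun d => !(d = '>')) ++ [if b ≠ 0 then ']' else '>'])]) := by
              simp [stepA]
            rw [this]
          rw [hfold, ih tl htl [] _ (by simp), glueT_nil]
          rw [glueT_cons,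
            if_pos (show ('<' :: rest.takeWhile (fun d => !(d = '>')) ++ ['>']).head? = some '<' from rfl),
            outTok_cons, outTok_cons, subT_word b cur hcur,
            subT_tag_closed b (rest.takeWhile (fun d => !(d = '>')))]
          have hne : String.mk ((if b ≠ 0 then ['['] else ['<']) ++ rest.takeWhile (fun d => !(d = '>')) ++ [if b ≠ 0 then ']' else '>']) ≠ "" := by
            rw [Ne, mk_eq_empty_iff]; split <;> simp
          rw [List.filter_append, List.filter_append, filter_single, filter_single,
            if_pos hne]
          simp
      · by_cases hws : c ∈ pyWsA
        · have hwsb : isWsB c = true := (ws_mem_iff c).mp hws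
          have hstep : stepA b (false, cur, out) c
              = (false, [], out ++ [String.mk (cur ++ [c])]) := by
            simp [stepA, hc, hws]
          rw [hstep, ih rest hrest [] _ (by simp), glueT_nil]
          rw [tokenizeB_word_eq c rest hc]
          have hcw : wordCharB c = false := by simp [wordCharB, hwsb]
          have hdrop : (c :: rest).dropWhile wordCharB = c :: rest := by
            simp [List.dropWhile_cons, hcw]
          have htake : (c :: rest).takeWhile wordCharB = [] := by
            simp [List.takeWhile_cons, hcw]
          rw [hdrop, htake]
          simp only [hwsb, if_true, List.nil_append]
          rw [glueT_cons, if_neg (by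
            simp only [List.head?_cons]
            intro h
            have : c = '<' := by simpa using h
            exact hc this)]
          have hhead : ¬ (cur ++ [c]).head? = some '<' := by
            cases cur with
            | nil =>
              simp only [List.nil_append, List.head?_cons]
              intro h; exact hc (by simpa using h)
            | cons a t =>
              simp only [List.cons_append, List.head?_cons]
              intro h
              have ha : a = '<' := by simpa using h
              subst ha
              simp [wordCharB] at hcur
          have hmk : String.mk (cur ++ [c]) ≠ "" := by
            rw [Ne, mk_eq_empty_iff]; simp
          rw [outTok_cons, subT_no_lt b (cur ++ [c]) hhead, if_pos hmk,
            List.filter_append, filter_single, if_pos hmk]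
          simp
        · have hwsb : isWsB c = false := by
            by_contra hh
            exact hws ((ws_mem_iff c).mpr (by simpa using hh))
          have hwc : wordCharB c = true := by simp [wordCharB, hc, hwsb]
          have hstep : stepA b (false, cur, out) c = (false, cur ++ [c], out) := by
            simp [stepA, hc, hws]
          rw [hstep, ih rest hrest (cur ++ [c]) out (by
            simp only [List.all_append, Bool.and_eq_true]
            exact ⟨hcur, by simp [hwc]⟩)]
          rw [← crux c rest cur hwc]

-- ===== VERDICT (by name: the statement is the Claim_ definition above) =====
theorem html2list_py_spec : Claim_equal_html2list_py := by
  intro x b _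
  unfold Spec_html2list_py html2list_py html2list_py_alt
  have h := mainA b (x.toList.length) x.toList le_rfl [] [] (by simp)
  simp only [List.filter_nil, List.nil_append] at h
  rw [h, glueT_nil]
  unfold outTok subT
  split <;> simp [List.map_map, Function.comp]
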